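-- pv_equiv track=rewrite | github.com/ShenyaoZhang/NLP-HW4 | capstone_project-33/task3/task3_drug_label_filter.py | is_indication_term
-- ===== SOURCE A (Python) =====
-- def is_indication_term(adverse_event):
--     """
--     Check if the adverse event is actually an indication (disease) rather than a true AE
--     These should be filtered out as they are NOT adverse events
--     """
--     indication_terms = [
--         'lymphoma', 'leukaemia', 'leukemia', 'myeloma', 'carcinoma',
--         'cancer', 'neoplasm', 'tumor', 'tumour', 'malignant',
--         'metastasis', 'metastatic', 'progression', 'refractory',
--         'recurrent', 'relapsed', 'sarcoma', 'melanoma'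
--     ]
--
--     ae_lower = adverse_event.lower()
--     for term in indication_terms:
--         if term in ae_lower:
--             return True
--     return False
-- ===== SOURCE B (Python) =====
-- _INDICATION_TERMS = (
--     'lymphoma', 'leukaemia', 'leukemia', 'myeloma', 'carcinoma',
--     'cancer', 'neoplasm', 'tumor', 'tumour', 'malignant',
--     'metastasis', 'metastatic', 'progression', 'refractory',
--     'recurrent', 'relapsed', 'sarcoma', 'melanoma'
-- )
--
--
-- def is_indication_term(adverse_event):
--     s = adverse_event.lower()
--     return any(s.startswith(_INDICATION_TERMS, i) for i in range(len(s)))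
-- ===== Notes on version B (the rewrite author's own statement) =====
-- stated objective: alternative
-- what changed: Replaces 18 sequential substring scans (one per keyword) by a single left-to-right pass over the lowered string that tests all keywords as prefixes at each position (tuple startswith).
import Mathlib
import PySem

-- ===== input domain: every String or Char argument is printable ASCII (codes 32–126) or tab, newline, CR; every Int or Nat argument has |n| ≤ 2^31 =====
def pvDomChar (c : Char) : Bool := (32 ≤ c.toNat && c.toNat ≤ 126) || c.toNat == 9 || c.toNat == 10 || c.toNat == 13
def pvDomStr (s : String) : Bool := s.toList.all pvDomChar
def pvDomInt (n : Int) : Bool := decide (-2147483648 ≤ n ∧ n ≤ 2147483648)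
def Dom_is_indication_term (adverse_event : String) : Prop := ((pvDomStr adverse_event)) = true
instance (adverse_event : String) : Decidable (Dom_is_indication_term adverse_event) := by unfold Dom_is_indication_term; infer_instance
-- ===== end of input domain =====

-- B replaces A's 18 sequential substring scans by one left-to-right pass testing all
-- keywords as prefixes at each position of the lowered string (objective: alternative).

-- ===== PORT A =====
def pvIndicationTerms : List String :=
  ["lymphoma", "leukaemia", "leukemia", "myeloma", "carcinoma",
   "cancer", "neoplasm", "tumor", "tumour", "malignant",
   "metastasis", "metastatic", "progression", "refractory",
   "recurrent", "relapsed", "sarcoma", "melanoma"]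

-- for term in indication_terms: if term in ae_lower: return True / return False
def pvLoopA (terms : List String) (ae_lower : String) : Bool :=
  match terms with
  | [] => false
  | t :: ts => if PySem.Str.isIn t ae_lower then true else pvLoopA ts ae_lower

def is_indication_term (adverse_event : String) : Bool :=
  let ae_lower := PySem.Str.lower adverse_event
  pvLoopA pvIndicationTerms ae_lower

-- ===== PORT B =====
def pvTermsChars : List (List Char) :=
  ["lymphoma".toList, "leukaemia".toList, "leukemia".toList, "myeloma".toList,
   "carcinoma".toList, "cancer".toList, "neoplasm".toList, "tumor".toList,
   "tumour".toList, "malignant".toList, "metastasis".toList, "metastatic".toList,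
   "progression".toList, "refractory".toList, "recurrent".toList, "relapsed".toList,
   "sarcoma".toList, "melanoma".toList]

-- any(s.startswith(_INDICATION_TERMS, i) for i in range(len(s))): one pass over the
-- suffixes of s, testing all keywords as prefixes at each position.
def pvSearch (cs : List Char) : Bool :=
  match cs with
  | [] => false
  | c :: rest => pvTermsChars.any (fun t => t.isPrefixOf (c :: rest)) || pvSearch rest

def is_indication_term_alt (adverse_event : String) : Bool :=
  pvSearch (PySem.Chars.lower adverse_event.toList)

-- ===== PRECONDITION & SPEC =====
def Spec_is_indication_term (adverse_event : String) (out : Bool) : Prop := out = is_indication_term_alt adverse_event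
instance (adverse_event : String) (out : Bool) : Decidable (Spec_is_indication_term adverse_event out) := by unfold Spec_is_indication_term; infer_instance

-- ===== CLAIM (what is proved, stated in full; the proofs are below) =====
def Claim_equal_is_indication_term : Prop := ∀ (adverse_event : String), Dom_is_indication_term adverse_event → Spec_is_indication_term adverse_event (is_indication_term adverse_event)

-- ===== LEMMAS AND PROOFS =====

-- A's early-return loop is true iff some term occurs as a substring.
theorem pvLoopA_eq_true_iff (terms : List String) (s : String) :
    pvLoopA terms s = true ↔ ∃ t ∈ terms, t.toList <:+: s.toList := by
  induction terms with
  | nil => simp [pvLoopA]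
  | cons t ts ih =>
    have hiff : PySem.Str.isIn t s = true ↔ t.toList <:+: s.toList := by
      rw [PySem.Str.isIn_eq]; exact PySem.Chars.isIn_iff_infix _ _
    simp only [pvLoopA]
    by_cases h : PySem.Str.isIn t s = true
    · simp only [if_pos h, true_iff]
      exact ⟨t, List.mem_cons_self, hiff.mp h⟩
    · rw [if_neg h, ih]
      constructor
      · rintro ⟨u, hu, hinf⟩; exact ⟨u, List.mem_cons_of_mem _ hu, hinf⟩
      · rintro ⟨u, hu, hinf⟩
        rcases List.mem_cons.mp hu with rfl | hu
        · exact absurd (hiff.mpr hinf) h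
        · exact ⟨u, hu, hinf⟩

-- every keyword is nonempty
theorem pvTermsChars_ne_nil : ∀ t ∈ pvTermsChars, t ≠ [] := by decide

-- B's position scan is true iff some term occurs as a substring.
theorem pvSearch_eq_true_iff (cs : List Char) :
    pvSearch cs = true ↔ ∃ t ∈ pvTermsChars, t <:+: cs := by
  induction cs with
  | nil =>
    simp only [pvSearch, Bool.false_eq_true, false_iff]
    rintro ⟨t, ht, hinf⟩
    exact pvTermsChars_ne_nil t ht (List.eq_nil_of_infix_nil hinf)
  | cons c rest ih =>
    simp only [pvSearch, Bool.or_eq_true, List.any_eq_true, ih]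
    constructor
    · rintro (⟨t, ht, hp⟩ | ⟨t, ht, hinf⟩)
      · exact ⟨t, ht, (List.IsPrefix.isInfix (List.isPrefixOf_iff_prefix.mp hp))⟩
      · exact ⟨t, ht, hinf.trans (List.infix_cons (List.infix_refl rest))⟩
    · rintro ⟨t, ht, hinf⟩
      rcases List.infix_cons_iff.mp hinf with hp | hinf'
      · exact Or.inl ⟨t, ht, List.isPrefixOf_iff_prefix.mpr hp⟩
      · exact Or.inr ⟨t, ht, hinf'⟩

-- the two keyword tables list the same words
theorem pvTerms_map : pvIndicationTerms.map String.toList = pvTermsChars := by decide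

-- ===== VERDICT (by name: the statement is the Claim_ definition above) =====
theorem is_indication_term_spec : Claim_equal_is_indication_term := by
  intro s _
  unfold Spec_is_indication_term
  rw [Bool.eq_iff_iff]
  simp only [is_indication_term, is_indication_term_alt]
  rw [pvLoopA_eq_true_iff, pvSearch_eq_true_iff, ← pvTerms_map]
  simp only [PySem.Str.toList_lower, List.mem_map]
  constructor
  · rintro ⟨t, ht, hinf⟩; exact ⟨t.toList, ⟨t, ht, rfl⟩, hinf⟩
  · rintro ⟨u, ⟨t, ht, rfl⟩, hinf⟩; exact ⟨t, ht, hinf⟩
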